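-- pv_equiv track=rewrite | github.com/Xiaoma716/NVIDIA-NIM | core/model_manager.py | _guess_owner
-- ===== SOURCE A (Python) =====
-- def _guess_owner(model_id: str) -> str:
--     """根据 model_id 前缀猜测所属组织"""
--     prefix_map = {
--         "meta/": "meta",
--         "mistralai/": "mistralai",
--         "google/": "google",
--         "microsoft/": "microsoft",
--         "nvidia/": "nvidia",
--         "deepseek-ai/": "deepseek-ai",
--         "qwen/": "qwen",
--         "01-ai/": "01-ai",
--         "baichuan-inc/": "baichuan",
--     }
--     for prefix, owner in prefix_map.items():
--         if model_id.startswith(prefix):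
--             return owner
--     return "nvidia"
-- ===== SOURCE B (Python) =====
-- _OWNER_BY_ORG = {
--     "meta": "meta",
--     "mistralai": "mistralai",
--     "google": "google",
--     "microsoft": "microsoft",
--     "nvidia": "nvidia",
--     "deepseek-ai": "deepseek-ai",
--     "qwen": "qwen",
--     "01-ai": "01-ai",
--     "baichuan-inc": "baichuan",
-- }
--
--
-- def _guess_owner(model_id: str) -> str:
--     head, sep, _ = model_id.partition("/")
--     if not sep:
--         return "nvidia"
--     return _OWNER_BY_ORG.get(head, "nvidia")
-- ===== Notes on version B (the rewrite author's own statement) =====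
-- stated objective: idiomatic
-- what changed: B splits the id once at the first slash with str.partition and does a single dict lookup on the leading segment (defaulting to 'nvidia', and only consulting the map when a separator was found), instead of A's loop of startswith tests over prefix strings.
import Mathlib
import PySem

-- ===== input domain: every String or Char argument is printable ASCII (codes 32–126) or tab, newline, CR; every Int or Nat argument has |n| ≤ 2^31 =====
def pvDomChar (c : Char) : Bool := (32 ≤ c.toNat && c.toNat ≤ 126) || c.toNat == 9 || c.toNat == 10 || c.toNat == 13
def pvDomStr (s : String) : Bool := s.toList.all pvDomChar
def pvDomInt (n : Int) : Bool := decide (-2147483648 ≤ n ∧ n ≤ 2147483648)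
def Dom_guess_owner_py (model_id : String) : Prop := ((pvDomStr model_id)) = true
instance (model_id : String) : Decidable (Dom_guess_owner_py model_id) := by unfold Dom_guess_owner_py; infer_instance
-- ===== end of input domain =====

-- B replaces A's in-order startswith loop by one partition at the first slash plus a single dict lookup (idiomatic; return value only).
-- ===== PORT A =====
-- A: walk the prefix->owner table in order, returning the owner of the first prefix model_id starts with.
def pvPrefixMap : List (String × String) :=
  [("meta/", "meta"), ("mistralai/", "mistralai"), ("google/", "google"),
   ("microsoft/", "microsoft"), ("nvidia/", "nvidia"), ("deepseek-ai/", "deepseek-ai"),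
   ("qwen/", "qwen"), ("01-ai/", "01-ai"), ("baichuan-inc/", "baichuan")]

def pvGuessLoop (model_id : String) : List (String × String) → String
  | [] => "nvidia"
  | (prefix_, owner) :: rest =>
      if PySem.Str.startswith model_id prefix_ then owner else pvGuessLoop model_id rest

def guess_owner_py (model_id : String) : String :=
  pvGuessLoop model_id pvPrefixMap

-- ===== PORT B =====
-- B: partition the id at the first '/', then one dict lookup on the leading segment.
def pvOwnerByOrg : PySem.Dict String String :=
  PySem.Dict.ofList
    [("meta", "meta"), ("mistralai", "mistralai"), ("google", "google"),
     ("microsoft", "microsoft"), ("nvidia", "nvidia"), ("deepseek-ai", "deepseek-ai"),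
     ("qwen", "qwen"), ("01-ai", "01-ai"), ("baichuan-inc", "baichuan")]

-- model_id.partition("/"): head = chars before the first '/', sep nonempty iff '/' occurs.
def guess_owner_py_alt (model_id : String) : String :=
  let head := String.ofList (model_id.toList.takeWhile (fun c => c ≠ '/'))
  let sepFound := model_id.toList.contains '/'
  if !sepFound then "nvidia"
  else PySem.Dict.getD pvOwnerByOrg head "nvidia"

-- ===== PRECONDITION & SPEC =====
def Spec_guess_owner_py (model_id : String) (out : String) : Prop := out = guess_owner_py_alt model_id
instance (model_id : String) (out : String) : Decidable (Spec_guess_owner_py model_id out) := by unfold Spec_guess_owner_py; infer_instance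

-- ===== CLAIM (what is proved, stated in full; the proofs are below) =====
def Claim_equal_guess_owner_py : Prop := ∀ (model_id : String), Dom_guess_owner_py model_id → Spec_guess_owner_py model_id (guess_owner_py model_id)

-- ===== LEMMAS AND PROOFS =====

-- A prefix "p ++ ['/']" with '/' ∉ p starts the string iff the segment before the first '/' is exactly p.
lemma pv_prefix_slash_iff (p l : List Char) (hp : '/' ∉ p) :
    (p ++ ['/']) <+: l ↔ (l.takeWhile (fun c => c ≠ '/') = p ∧ '/' ∈ l) := by
  induction p generalizing l with
  | nil =>
    cases l with
    | nil => simp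
    | cons c r =>
      by_cases h : c = '/'
      · subst h; simp
      · simp [List.cons_prefix_cons, h, Ne.symm h]
  | cons a p ih =>
    have ha : a ≠ '/' := fun h => hp (h ▸ List.mem_cons_self)
    have hp' : '/' ∉ p := fun h => hp (List.mem_cons_of_mem _ h)
    cases l with
    | nil => simp
    | cons c r =>
      by_cases h : c = a
      · subst h
        simp [List.cons_prefix_cons, ha, ih r hp', Ne.symm ha]
      · refine ⟨fun hpre => absurd ((List.cons_prefix_cons.mp hpre).1).symm h, fun hrhs => ?_⟩
        exfalso
        rcases hrhs with ⟨ht, -⟩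
        by_cases hc : c = '/'
        · simp [hc] at ht
        · simp [hc] at ht
          exact h ht.1

lemma pv_startswith_slash (m full : String) (p : List Char)
    (hfull : full.toList = p ++ ['/']) (hp : '/' ∉ p) :
    PySem.Str.startswith m full = true ↔
      (m.toList.takeWhile (fun c => c ≠ '/') = p ∧ '/' ∈ m.toList) := by
  rw [PySem.Str.startswith_eq, PySem.Chars.startswith_iff, hfull]
  exact pv_prefix_slash_iff p m.toList hp

-- ===== VERDICT (by name: the statement is the Claim_ definition above) =====
theorem guess_owner_py_spec : Claim_equal_guess_owner_py := by
  intro m _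
  unfold Spec_guess_owner_py guess_owner_py guess_owner_py_alt pvPrefixMap
  simp only [pvGuessLoop]
  by_cases hm : '/' ∈ m.toList
  · have heq : ∀ (full : String) (p : List Char), full.toList = p ++ ['/'] → '/' ∉ p →
        PySem.Str.startswith m full =
          decide (m.toList.takeWhile (fun c => c ≠ '/') = p) := by
      intro full p hfull hp
      by_cases h : m.toList.takeWhile (fun c => c ≠ '/') = p
      · rw [(pv_startswith_slash m full p hfull hp).mpr ⟨h, hm⟩, h]
        simp
      · simp only [h, decide_false]
        exact Bool.eq_false_iff.mpr
          (fun hb => h ((pv_startswith_slash m full p hfull hp).mp hb).1)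
    have hc : (m.toList.contains '/') = true := by simpa using hm
    simp only [hc, Bool.not_true, Bool.false_eq_true, if_false]
    have e1 := heq "meta/" "meta".toList rfl (by decide)
    have e2 := heq "mistralai/" "mistralai".toList rfl (by decide)
    have e3 := heq "google/" "google".toList rfl (by decide)
    have e4 := heq "microsoft/" "microsoft".toList rfl (by decide)
    have e5 := heq "nvidia/" "nvidia".toList rfl (by decide)
    have e6 := heq "deepseek-ai/" "deepseek-ai".toList rfl (by decide)
    have e7 := heq "qwen/" "qwen".toList rfl (by decide)
    have e8 := heq "01-ai/" "01-ai".toList rfl (by decide)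
    have e9 := heq "baichuan-inc/" "baichuan-inc".toList rfl (by decide)
    set t := m.toList.takeWhile (fun c => c ≠ '/') with ht
    by_cases h1 : t = "meta".toList
    · simp only [e1, e2, e3, e4, e5, e6, e7, e8, e9, h1]
      decide
    by_cases h2 : t = "mistralai".toList
    · simp only [e1, e2, e3, e4, e5, e6, e7, e8, e9, h2]
      decide
    by_cases h3 : t = "google".toList
    · simp only [e1, e2, e3, e4, e5, e6, e7, e8, e9, h3]
      decide
    by_cases h4 : t = "microsoft".toList
    · simp only [e1, e2, e3, e4, e5, e6, e7, e8, e9, h4]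
      decide
    by_cases h5 : t = "nvidia".toList
    · simp only [e1, e2, e3, e4, e5, e6, e7, e8, e9, h5]
      decide
    by_cases h6 : t = "deepseek-ai".toList
    · simp only [e1, e2, e3, e4, e5, e6, e7, e8, e9, h6]
      decide
    by_cases h7 : t = "qwen".toList
    · simp only [e1, e2, e3, e4, e5, e6, e7, e8, e9, h7]
      decide
    by_cases h8 : t = "01-ai".toList
    · simp only [e1, e2, e3, e4, e5, e6, e7, e8, e9, h8]
      decide
    by_cases h9 : t = "baichuan-inc".toList
    · simp only [e1, e2, e3, e4, e5, e6, e7, e8, e9, h9]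
      decide
    · have hinj : ∀ (p : List Char), t ≠ p → String.ofList t ≠ String.ofList p :=
        fun p hne h => hne (by simpa using congrArg String.toList h)
      have n1 : ("meta" : String) ≠ String.ofList t := fun h => hinj _ h1 h.symm
      have n2 : ("mistralai" : String) ≠ String.ofList t := fun h => hinj _ h2 h.symm
      have n3 : ("google" : String) ≠ String.ofList t := fun h => hinj _ h3 h.symm
      have n4 : ("microsoft" : String) ≠ String.ofList t := fun h => hinj _ h4 h.symm
      have n5 : ("nvidia" : String) ≠ String.ofList t := fun h => hinj _ h5 h.symm
      have n6 : ("deepseek-ai" : String) ≠ String.ofList t := fun h => hinj _ h6 h.symm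
      have n7 : ("qwen" : String) ≠ String.ofList t := fun h => hinj _ h7 h.symm
      have n8 : ("01-ai" : String) ≠ String.ofList t := fun h => hinj _ h8 h.symm
      have n9 : ("baichuan-inc" : String) ≠ String.ofList t := fun h => hinj _ h9 h.symm
      simp only [e1, e2, e3, e4, e5, e6, e7, e8, e9]
      have g1 : ¬ (t = ['m', 'e', 't', 'a']) := by simpa using h1
      have g2 : ¬ (t = ['m', 'i', 's', 't', 'r', 'a', 'l', 'a', 'i']) := by simpa using h2
      have g3 : ¬ (t = ['g', 'o', 'o', 'g', 'l', 'e']) := by simpa using h3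
      have g4 : ¬ (t = ['m', 'i', 'c', 'r', 'o', 's', 'o', 'f', 't']) := by simpa using h4
      have g5 : ¬ (t = ['n', 'v', 'i', 'd', 'i', 'a']) := by simpa using h5
      have g6 : ¬ (t = ['d', 'e', 'e', 'p', 's', 'e', 'e', 'k', '-', 'a', 'i']) := by simpa using h6
      have g7 : ¬ (t = ['q', 'w', 'e', 'n']) := by simpa using h7
      have g8 : ¬ (t = ['0', '1', '-', 'a', 'i']) := by simpa using h8
      have g9 : ¬ (t = ['b', 'a', 'i', 'c', 'h', 'u', 'a', 'n', '-', 'i', 'n', 'c']) := by simpa using h9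
      have hd : pvOwnerByOrg = PySem.Dict.mk
          [("meta", "meta"), ("mistralai", "mistralai"), ("google", "google"),
           ("microsoft", "microsoft"), ("nvidia", "nvidia"), ("deepseek-ai", "deepseek-ai"),
           ("qwen", "qwen"), ("01-ai", "01-ai"), ("baichuan-inc", "baichuan")] := by decide
      have hg : pvOwnerByOrg.get? (String.ofList t) = none := by
        rw [hd]
        simp only [PySem.Dict.get?_mk_cons, beq_iff_eq]
        simp [PySem.Dict.get?, n1, n2, n3, n4, n5, n6, n7, n8, n9]
      simp [g1, g2, g3, g4, g5, g6, g7, g8, g9, PySem.Dict.getD, hg]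
  · have hc : (m.toList.contains '/') = false := by simpa using hm
    have hf : ∀ (full : String) (p : List Char), full.toList = p ++ ['/'] → '/' ∉ p →
        PySem.Str.startswith m full = false := by
      intro full p hfull hp
      exact Bool.eq_false_iff.mpr
        (fun hb => hm ((pv_startswith_slash m full p hfull hp).mp hb).2)
    have f1 := hf "meta/" "meta".toList rfl (by decide)
    have f2 := hf "mistralai/" "mistralai".toList rfl (by decide)
    have f3 := hf "google/" "google".toList rfl (by decide)
    have f4 := hf "microsoft/" "microsoft".toList rfl (by decide)
    have f5 := hf "nvidia/" "nvidia".toList rfl (by decide)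
    have f6 := hf "deepseek-ai/" "deepseek-ai".toList rfl (by decide)
    have f7 := hf "qwen/" "qwen".toList rfl (by decide)
    have f8 := hf "01-ai/" "01-ai".toList rfl (by decide)
    have f9 := hf "baichuan-inc/" "baichuan-inc".toList rfl (by decide)
    simp only [hc, Bool.not_false, if_true, f1, f2, f3, f4, f5, f6, f7, f8, f9,
      Bool.false_eq_true, if_false]
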